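-- pv_equiv track=rewrite | github.com/NeuralDev-io/arclytics_simcct | services/simcct/sim_api/models.py | validate_comp_elements
-- ===== SOURCE A (Python) =====
-- from typing import Tuple, Union
--
-- def validate_comp_elements(alloy_comp: list) -> Tuple[bool, list]:
--     """We validate the alloy has all the elements that will be needed by the
--     simulation algorithms using a hashed dictionary as it is much faster.
--
--     Args:
--         alloy_comp: a list of Alloy composition objects (i.e.
--                     {"symbol": "C", "weight": 1.0})
--
--     Returns:
--         A tuple response whether the validation succeeded and the missing
--         elements if it did not.
--     """
--     valid_elements = {
--         'C': False,
--         'Mn': False,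
--         'Ni': False,
--         'Cr': False,
--         'Mo': False,
--         'Si': False,
--         'Co': False,
--         'W': False,
--         'As': False,
--         'Fe': False
--     }
--
--     for el in alloy_comp:
--         if el['symbol'] in valid_elements.keys():
--             valid_elements[el['symbol']] = True
--
--     # all() returns True if all values in the dict are True
--     # If it does not pass, we build up a message and respond.
--     if not all(el is True for el in valid_elements.values()):
--         # We build up a list of missing elements for the response.
--         missing_elem = []
--         for k, v in valid_elements.items():
--             if not v:
--                 missing_elem.append(k)
--         # The validation has failed so we return False and the missing elements
--         return False, missing_elem
--     # The validation has succeeded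
--     return True, []
-- ===== SOURCE B (Python) =====
-- REQUIRED = ('C', 'Mn', 'Ni', 'Cr', 'Mo', 'Si', 'Co', 'W', 'As', 'Fe')
--
--
-- def validate_comp_elements(alloy_comp):
--     # Required-major nested scan: for each required element, search the
--     # composition for it; no dictionary or set of flags is built at all.
--     missing = [e for e in REQUIRED
--                if all(el['symbol'] != e for el in alloy_comp)]
--     return (not missing, missing)
-- ===== Notes on version B (the rewrite author's own statement) =====
-- stated objective: alternative
-- what changed: Inverts the traversal: instead of one pass over the composition mutating a flag-dictionary and then two reporting loops, B loops over the fixed REQUIRED tuple and for each element searches the composition directly (a required-major nested scan); no dict/set of flags is ever built.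
import Mathlib
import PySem

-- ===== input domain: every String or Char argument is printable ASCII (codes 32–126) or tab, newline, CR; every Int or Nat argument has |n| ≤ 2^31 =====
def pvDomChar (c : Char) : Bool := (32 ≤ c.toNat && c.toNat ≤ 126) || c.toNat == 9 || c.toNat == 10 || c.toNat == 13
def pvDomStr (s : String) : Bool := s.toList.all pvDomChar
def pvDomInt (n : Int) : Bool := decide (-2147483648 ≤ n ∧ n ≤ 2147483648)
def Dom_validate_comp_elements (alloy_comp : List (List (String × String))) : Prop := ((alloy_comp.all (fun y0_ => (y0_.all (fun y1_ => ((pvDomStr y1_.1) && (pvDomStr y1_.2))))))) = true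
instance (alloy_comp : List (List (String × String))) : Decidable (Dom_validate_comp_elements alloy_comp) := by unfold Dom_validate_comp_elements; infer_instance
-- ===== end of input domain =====

-- B inverts the traversal: instead of a flag-dictionary mutated in one pass plus two reporting
-- loops, it loops over the fixed REQUIRED list and searches the composition for each element
-- (alternative decomposition, same observable result).

-- ===== PORT A =====
def validate_comp_elements (alloy_comp : List (List (String × String))) : Bool × List String :=
  let valid_elements : PySem.Dict String Bool :=
    PySem.Dict.ofList [("C", false), ("Mn", false), ("Ni", false), ("Cr", false), ("Mo", false),
                       ("Si", false), ("Co", false), ("W", false), ("As", false), ("Fe", false)]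
  let valid_elements := alloy_comp.foldl (fun d el =>
    match (PySem.Dict.ofList el).get? "symbol" with
    | none => d            -- Python raises KeyError here; excluded by Pre_
    | some s => if d.keys.contains s then d.insert s true else d) valid_elements
  if ¬ (valid_elements.values.all (fun v => v == true)) then
    let missing_elem := valid_elements.items.foldl
      (fun acc p => if !p.2 then acc ++ [p.1] else acc) []
    (false, missing_elem)
  else (true, [])

-- ===== PORT B =====
def REQUIRED_elements : List String :=
  ["C", "Mn", "Ni", "Cr", "Mo", "Si", "Co", "W", "As", "Fe"]

def validate_comp_elements_alt (alloy_comp : List (List (String × String))) : Bool × List String :=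
  -- all(el['symbol'] != e for el in alloy_comp); get? = none is Python's KeyError, excluded by Pre_
  let missing := REQUIRED_elements.filter (fun e =>
    alloy_comp.all (fun el => !((PySem.Dict.ofList el).get? "symbol" == some e)))
  (missing.isEmpty, missing)

-- ===== PRECONDITION & SPEC =====
-- Pre_ excludes exactly the entries without a 'symbol' key, where Python A (and Python B) raise KeyError.
def Pre_validate_comp_elements (alloy_comp : List (List (String × String))) : Prop :=
  (alloy_comp.all (fun el => el.any (fun p => p.1 == "symbol"))) = true
instance (alloy_comp : List (List (String × String))) : Decidable (Pre_validate_comp_elements alloy_comp) := by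
  unfold Pre_validate_comp_elements; infer_instance

def pvWitness_validate_comp_elements : (List (List (String × String))) :=
  [[("symbol", "C"), ("weight", "1")], [("symbol", "Xx")]]

def Spec_validate_comp_elements (alloy_comp : List (List (String × String))) (out : Bool × List String) : Prop := out = validate_comp_elements_alt alloy_comp
instance (alloy_comp : List (List (String × String))) (out : Bool × List String) : Decidable (Spec_validate_comp_elements alloy_comp out) := by unfold Spec_validate_comp_elements; infer_instance

-- ===== CLAIM (what is proved, stated in full; the proofs are below) =====
def Claim_equal_validate_comp_elements : Prop := ∀ (alloy_comp : List (List (String × String))), Dom_validate_comp_elements alloy_comp → Pre_validate_comp_elements alloy_comp → Spec_validate_comp_elements alloy_comp (validate_comp_elements alloy_comp)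

-- ===== LEMMAS AND PROOFS =====

-- A's loop over the composition equals the same loop over the extracted symbol list.
lemma loopA_eq_loop_syms (xs : List (List (String × String))) (d : PySem.Dict String Bool) :
    xs.foldl (fun d el =>
      match (PySem.Dict.ofList el).get? "symbol" with
      | none => d
      | some s => if d.keys.contains s then d.insert s true else d) d
    = (xs.filterMap (fun el => (PySem.Dict.ofList el).get? "symbol")).foldl
        (fun d s => if d.keys.contains s then d.insert s true else d) d := by
  induction xs generalizing d with
  | nil => rfl
  | cons x t ih =>
    simp only [List.foldl_cons, List.filterMap_cons]
    cases h : (PySem.Dict.ofList x).get? "symbol" with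
    | none => exact ih d
    | some s => exact ih _

-- The symbol loop only overwrites existing keys: each value becomes v || (its key was seen).
lemma items_loop_syms (syms : List String) (d : PySem.Dict String Bool) (hn : d.keys.Nodup) :
    (syms.foldl (fun d s => if d.keys.contains s then d.insert s true else d) d).items
    = d.items.map (fun p => (p.1, p.2 || syms.contains p.1)) := by
  induction syms generalizing d with
  | nil => simp
  | cons s t ih =>
    simp only [List.foldl_cons]
    by_cases hc : d.keys.contains s = true
    · have hcon : d.contains s = true := by
        rw [PySem.Dict.contains_eq_decide_mem_keys]
        simpa [List.contains_iff_mem] using hc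
      have hk : (d.insert s true).keys = d.keys := PySem.Dict.keys_insert_of_contains d true hcon
      rw [if_pos hc, ih _ (by rw [hk]; exact hn), PySem.Dict.items_insert_of_contains d true hcon,
        List.map_map]
      apply List.map_congr_left
      intro p _
      by_cases hp : p.1 = s
      · simp [Function.comp, hp]
      · simp [Function.comp, hp, beq_iff_eq]
    · rw [if_neg hc, ih _ hn]
      apply List.map_congr_left
      intro p hp
      have hmem : p.1 ∈ d.keys := PySem.Dict.mem_keys_of_mem_items d hp
      have hne : p.1 ≠ s := by
        intro h; apply hc; subst h
        simpa [List.contains_iff_mem] using hmem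
      simp [hne]

-- 'append the first component when the flag is down' over the tagged list is a filter of the keys.
lemma map_fst_filter_snd (l : List String) (c : String → Bool) :
    ((l.map (fun k => (k, c k))).filter (fun p => !p.2)).map (·.1)
    = l.filter (fun k => !c k) := by
  induction l with
  | nil => rfl
  | cons x t ih => by_cases h : c x <;> simp [h, ih]

-- B's inner search over the composition is the negation of membership in the symbol list.
lemma all_ne_eq_not_contains (xs : List (List (String × String))) (e : String) :
    (xs.all (fun el => !((PySem.Dict.ofList el).get? "symbol" == some e)))
    = !((xs.filterMap (fun el => (PySem.Dict.ofList el).get? "symbol")).contains e) := by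
  induction xs with
  | nil => rfl
  | cons x t ih =>
    simp only [List.all_cons, List.filterMap_cons]
    cases h : (PySem.Dict.ofList x).get? "symbol" with
    | none => simp [ih]
    | some s =>
      simp only [ih, List.contains_cons, Bool.not_or]
      have : (e == s) = (s == e) := by simp [eq_comm]
      simp [this]

theorem validate_comp_elements_spec_aux (alloy_comp : List (List (String × String))) :
    validate_comp_elements alloy_comp = validate_comp_elements_alt alloy_comp := by
  unfold validate_comp_elements validate_comp_elements_alt
  dsimp only
  rw [loopA_eq_loop_syms]
  set syms := alloy_comp.filterMap (fun el => (PySem.Dict.ofList el).get? "symbol") with hsyms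
  set dfin := syms.foldl (fun d s => if d.keys.contains s then d.insert s true else d)
    (PySem.Dict.ofList [("C", false), ("Mn", false), ("Ni", false), ("Cr", false), ("Mo", false),
                        ("Si", false), ("Co", false), ("W", false), ("As", false), ("Fe", false)]) with hdfin
  have hFeq : REQUIRED_elements.filter (fun e =>
      alloy_comp.all (fun el => !((PySem.Dict.ofList el).get? "symbol" == some e)))
      = REQUIRED_elements.filter (fun e => !(syms.contains e)) := by
    apply List.filter_congr
    intro e _
    rw [all_ne_eq_not_contains, hsyms]
  rw [hFeq]
  set F := REQUIRED_elements.filter (fun e => !(syms.contains e)) with hF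
  have hit : dfin.items = REQUIRED_elements.map (fun k => (k, syms.contains k)) := by
    rw [hdfin, items_loop_syms syms _ (by decide)]; rfl
  have hvals : dfin.values = REQUIRED_elements.map (fun k => syms.contains k) := by
    have hv : dfin.values = dfin.items.map (·.2) := rfl
    rw [hv, hit, List.map_map]; rfl
  by_cases hall : (dfin.values.all (fun v => v == true)) = true
  · rw [if_neg (not_not_intro hall)]
    have hnil : F = [] := by
      rw [hF, List.filter_eq_nil_iff]
      intro a ha
      have : syms.contains a = true := by
        have := List.all_eq_true.mp (by rw [hvals] at hall; exact hall) _ (List.mem_map_of_mem ha)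
        simpa using this
      simpa using this
    rw [hnil]; rfl
  · rw [if_pos hall]
    have hmiss : dfin.items.foldl (fun acc p => if !p.2 then acc ++ [p.1] else acc) [] = F := by
      rw [PySem.List.foldl_append_if, hit, map_fst_filter_snd, List.nil_append, hF]
    rw [hmiss]
    have hne : F ≠ [] := by
      intro hnil
      apply hall
      rw [hvals, List.all_eq_true]
      intro v hv
      obtain ⟨k, hk, hck⟩ := List.mem_map.mp hv
      have := List.filter_eq_nil_iff.mp (hF ▸ hnil) k hk
      simp only [Bool.not_eq_true', Bool.not_eq_false] at this
      rw [← hck, this]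
      rfl
    have hie : F.isEmpty = false := by
      cases hFc : F with
      | nil => exact absurd hFc hne
      | cons a t => rfl
    rw [hie]

-- ===== VERDICT (by name: the statement is the Claim_ definition above) =====
theorem validate_comp_elements_spec : Claim_equal_validate_comp_elements := by
  intro alloy_comp _ _
  exact validate_comp_elements_spec_aux alloy_comp
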